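-- pv_equiv track=rewrite | github.com/jliznaga/algorithms | challenges/medium/count_bounded_slices.py | solution
-- ===== SOURCE A (Python) =====
-- from collections import deque
--
-- def solution(K, A):
--     # Initialize count and two deques
--     count = 0
--     max_dq = deque()  # To keep track of the maximum element's index
--     min_dq = deque()  # To keep track of the minimum element's index
--
--     j = 0
--     for i in range(len(A)):
--         # Expand the window
--         while j < len(A):
--             # Update max_dq
--             while max_dq and A[max_dq[-1]] <= A[j]:
--                 max_dq.pop()
--             max_dq.append(j)
--
--             # Update min_dq
--             while min_dq and A[min_dq[-1]] >= A[j]: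
--                 min_dq.pop()
--             min_dq.append(j)
--
--             # Check if current window satisfies the condition
--             if A[max_dq[0]] - A[min_dq[0]] <= K:
--                 j += 1
--             else:
--                 break
--
--         # Count the number of subarrays that satisfy the condition
--         # All subarrays starting at i and ending before j satisfy the condition
--         count += j - i
--
--         # Shrink the window
--         if max_dq and max_dq[0] == i:
--             max_dq.popleft()
--         if min_dq and min_dq[0] == i:
--             min_dq.popleft()
--
--     return count
-- ===== SOURCE B (Python) =====
-- def solution(K, A):
--     # For each start index, scan right keeping a running min/max until the
--     # slice stops being bounded; count the valid slices (0 when K < 0).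
--     total = 0
--     for i in range(len(A)):
--         mn = mx = A[i]
--         for x in A[i:]:
--             mn = min(mn, x)
--             mx = max(mx, x)
--             if mx - mn > K:
--                 break
--             total += 1
--     return total
-- ===== Notes on version B (the rewrite author's own statement) =====
-- stated objective: simpler
-- what changed: Replaced the two monotone-deque sliding-window two-pointer loop by a plain per-start rescan with a running min/max (no deques, no shared window state), which also returns the intended 0 instead of a negative count when K < 0.
-- intended difference: For K < 0 and len(A) >= 2, A returns the negative value -n*(n-1)/2 (its left pointer overtakes the stuck right pointer and it adds negative window lengths) while B returns 0, the intended count since no slice has max-min <= K < 0. — e.g. on solution(-1, [0, 0]): A returns -1, B returns 0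
import Mathlib
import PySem

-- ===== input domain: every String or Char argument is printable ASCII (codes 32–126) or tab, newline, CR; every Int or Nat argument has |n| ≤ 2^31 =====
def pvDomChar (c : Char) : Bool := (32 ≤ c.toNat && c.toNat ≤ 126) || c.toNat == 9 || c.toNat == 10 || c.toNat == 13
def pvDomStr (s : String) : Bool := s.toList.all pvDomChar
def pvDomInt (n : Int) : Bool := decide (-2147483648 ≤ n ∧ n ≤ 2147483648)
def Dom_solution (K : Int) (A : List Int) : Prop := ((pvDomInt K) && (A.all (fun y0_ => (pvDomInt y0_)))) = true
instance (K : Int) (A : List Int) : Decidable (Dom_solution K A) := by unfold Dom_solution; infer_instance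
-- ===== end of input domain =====

-- B replaces A's two monotone-deque sliding-window two-pointer loop by a plain per-start rescan
-- with a running min/max; on K < 0 with ≥ 2 elements A returns a negative count while B returns
-- the intended 0 (see D_solution).

-- ===== PORT A =====
-- Python A[d] for an index that is always in range here (deque entries and j are valid indices)
def aGet (A : List Int) (d : Nat) : Int := A.getD d 0

-- "while dq and le(A[dq[-1]], A[j]): dq.pop()" then "dq.append(j)" — deque kept front-first;
-- popping from the back while the test holds = dropWhile on the reverse
def pushDq (A : List Int) (le : Int → Int → Bool) (dq : List Nat) (j : Nat) : List Nat :=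
  (dq.reverse.dropWhile (fun d => le (aGet A d) (aGet A j))).reverse ++ [j]

-- "if dq and dq[0] == i: dq.popleft()"
def shrinkDq (dq : List Nat) (i : Nat) : List Nat :=
  match dq with
  | [] => []
  | d :: ds => if d = i then ds else d :: ds

-- "while j < len(A): … update both deques … if A[max_dq[0]] - A[min_dq[0]] <= K: j += 1 else: break"
def expandA (K : Int) (A : List Int) (maxdq mindq : List Nat) (j : Nat) :
    List Nat × List Nat × Nat :=
  if _h : j < A.length then
    let maxdq' := pushDq A (fun x y => decide (x ≤ y)) maxdq j
    let mindq' := pushDq A (fun x y => decide (y ≤ x)) mindq j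
    if aGet A (maxdq'.headD 0) - aGet A (mindq'.headD 0) ≤ K then
      expandA K A maxdq' mindq' (j + 1)
    else (maxdq', mindq', j)
  else (maxdq, mindq, j)
termination_by A.length - j

-- one iteration of "for i in range(len(A))": expand, count += j - i, shrink both deques
def stepA (K : Int) (A : List Int) (s : Int × List Nat × List Nat × Nat) (i : Nat) :
    Int × List Nat × List Nat × Nat :=
  let r := expandA K A s.2.1 s.2.2.1 s.2.2.2
  (s.1 + ((r.2.2 : Int) - (i : Int)), shrinkDq r.1 i, shrinkDq r.2.1 i, r.2.2)

def solution (K : Int) (A : List Int) : Int :=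
  ((List.range A.length).foldl (stepA K A) (0, [], [], 0)).1

-- ===== PORT B =====
-- "mn = mx = A[i]; for x in A[i:]: mn = min(mn, x); mx = max(mx, x); if mx - mn > K: break; total += 1"
def scanB (K : Int) : Int → Int → Int → List Int → Int
  | _, _, cnt, [] => cnt
  | mn, mx, cnt, x :: xs =>
    let mn' := min mn x
    let mx' := max mx x
    if K < mx' - mn' then cnt else scanB K mn' mx' (cnt + 1) xs

def solution_alt (K : Int) (A : List Int) : Int :=
  (List.range A.length).foldl
    (fun total i => scanB K (A.getD i 0) (A.getD i 0) total (A.drop i)) 0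

-- ===== PRECONDITION & SPEC =====
-- For K < 0 and len(A) >= 2, A returns the negative value -n*(n-1)/2 (its left pointer overtakes
-- the stuck right pointer and it adds negative window lengths) while B returns 0, the intended
-- count since no slice has max - min ≤ K < 0.
def D_solution (K : Int) (A : List Int) : Prop := K < 0 ∧ 2 ≤ A.length
instance (K : Int) (A : List Int) : Decidable (D_solution K A) := by unfold D_solution; infer_instance

def Spec_solution (K : Int) (A : List Int) (out : Int) : Prop := ¬ D_solution K A → out = solution_alt K A
instance (K : Int) (A : List Int) (out : Int) : Decidable (Spec_solution K A out) := by unfold Spec_solution; infer_instance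

def pvDiffWitness_solution : Int × List Int := (-1, [0, 0])
def pvDiffWitnessOut_solution : Int × Int := (-1, 0)

-- ===== CLAIM (what is proved, stated in full; the proofs are below) =====
def Claim_unchanged_solution : Prop := ∀ (K : Int) (A : List Int), Dom_solution K A → Spec_solution K A (solution K A)
def Claim_changed_solution : Prop := Dom_solution (pvDiffWitness_solution.1) (pvDiffWitness_solution.2) ∧ D_solution (pvDiffWitness_solution.1) (pvDiffWitness_solution.2) ∧ solution (pvDiffWitness_solution.1) (pvDiffWitness_solution.2) = pvDiffWitnessOut_solution.1 ∧ solution_alt (pvDiffWitness_solution.1) (pvDiffWitness_solution.2) = pvDiffWitnessOut_solution.2 ∧ pvDiffWitnessOut_solution.1 ≠ pvDiffWitnessOut_solution.2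
def Claim_exact_solution : Prop := ∀ (K : Int) (A : List Int), Dom_solution K A → D_solution K A → solution K A ≠ solution_alt K A

-- ===== LEMMAS AND PROOFS =====
def domb (A : List Int) (le : Int → Int → Bool) (d r : Nat) : Bool :=
  (List.range' (d + 1) (r - d)).all fun k => !le (aGet A d) (aGet A k)

def wcands (A : List Int) (le : Int → Int → Bool) (i j : Nat) : List Nat :=
  (List.range' i (j - i)).filter fun d => domb A le d (j - 1)

def validb (K : Int) (A : List Int) (i r : Nat) : Bool :=
  (List.range' i (r + 1 - i)).all fun p =>
    (List.range' i (r + 1 - i)).all fun q => decide (aGet A p - aGet A q ≤ K)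

def firstBad (K : Int) (A : List Int) (i : Nat) : Nat :=
  Nat.find (p := fun r => A.length ≤ r ∨ validb K A i r = false) ⟨A.length, Or.inl le_rfl⟩

def runMin (A : List Int) (i p : Nat) : Int :=
  (List.range' i (p - i)).foldl (fun m r => min m (aGet A r)) (aGet A i)

def runMax (A : List Int) (i p : Nat) : Int :=
  (List.range' i (p - i)).foldl (fun m r => max m (aGet A r)) (aGet A i)

lemma dropWhile_eq_filter_of_mono (q : Nat → Bool) :
    ∀ (l : List Nat), l.Pairwise (fun x y => q y = true → q x = true) →
    l.dropWhile q = l.filter (fun d => !q d)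
  | [], _ => rfl
  | x :: xs, h => by
    rcases List.pairwise_cons.mp h with ⟨hx, hxs⟩
    by_cases hq : q x = true
    · rw [List.dropWhile_cons_of_pos hq, List.filter_cons_of_neg (by simp [hq]),
        dropWhile_eq_filter_of_mono q xs hxs]
    · rw [List.dropWhile_cons_of_neg hq, List.filter_cons_of_pos (by simp [hq])]
      have hself : xs.filter (fun d => !q d) = xs := List.filter_eq_self.mpr (by
        intro y hy
        cases hqy : q y
        · simp
        · exact absurd (hx y hy hqy) hq)
      rw [hself]

lemma pushDq_eq_filter (A : List Int) (le : Int → Int → Bool) (dq : List Nat) (j : Nat)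
    (h : dq.Pairwise (fun d d' => le (aGet A d) (aGet A j) = true → le (aGet A d') (aGet A j) = true)) :
    pushDq A le dq j = dq.filter (fun d => !le (aGet A d) (aGet A j)) ++ [j] := by
  unfold pushDq
  rw [dropWhile_eq_filter_of_mono _ _ (List.pairwise_reverse.mpr (by
        exact h.imp_of_mem (fun _ _ h => h)))]
  rw [← List.filter_reverse, List.reverse_reverse]

lemma mem_wcands (A : List Int) (le : Int → Int → Bool) (i j d : Nat) :
    d ∈ wcands A le i j ↔ i ≤ d ∧ d < j ∧ domb A le d (j - 1) = true := by
  simp only [wcands, List.mem_filter, List.mem_range'_1]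
  constructor
  · rintro ⟨⟨h1, h2⟩, h3⟩; exact ⟨h1, by omega, h3⟩
  · rintro ⟨h1, h2, h3⟩; exact ⟨⟨h1, by omega⟩, h3⟩

lemma domb_iff (A : List Int) (le : Int → Int → Bool) (d r : Nat) :
    domb A le d r = true ↔ ∀ k, d < k → k ≤ r → le (aGet A d) (aGet A k) = false := by
  simp only [domb, List.all_eq_true, List.mem_range'_1, Bool.not_eq_true']
  constructor
  · intro h k h1 h2; exact h k ⟨by omega, by omega⟩
  · intro h k ⟨h1, h2⟩; exact h k (by omega) (by omega)

lemma wcands_pairwise_lt (A : List Int) (le : Int → Int → Bool) (i j : Nat) :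
    (wcands A le i j).Pairwise (· < ·) :=
  List.Pairwise.sublist List.filter_sublist (by simpa using List.pairwise_lt_range' (s := i) (n := j - i) (step := 1))

lemma wcands_pairwise_push (A : List Int) (le : Int → Int → Bool) (i m : Nat)
    (htot : ∀ x y, le x y = false → le y x = true)
    (htr : ∀ x y z, le x y = true → le y z = true → le x z = true) (x : Int) :
    (wcands A le i m).Pairwise (fun d d' => le (aGet A d) x = true → le (aGet A d') x = true) := by
  refine (wcands_pairwise_lt A le i m).imp_of_mem (fun {d d'} hd hd' hlt hq => ?_)
  rw [mem_wcands] at hd hd'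
  have hdom := (domb_iff A le d (m - 1)).mp hd.2.2 d' hlt (by omega)
  exact htr _ _ _ (htot _ _ hdom) hq

lemma domb_succ (A : List Int) (le : Int → Int → Bool) (d j : Nat) (h : d < j) :
    domb A le d j = (domb A le d (j - 1) && !le (aGet A d) (aGet A j)) := by
  unfold domb
  have h1 : j - d = (j - 1 - d) + 1 := by omega
  have h2 : d + 1 + (j - 1 - d) = j := by omega
  rw [h1, List.range'_1_concat, h2, List.all_append]
  simp

lemma wcands_last (A : List Int) (le : Int → Int → Bool) (i j : Nat) (hij : i ≤ j) :
    wcands A le i (j + 1) =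
      (wcands A le i j).filter (fun d => !le (aGet A d) (aGet A j)) ++ [j] := by
  unfold wcands
  have h1 : j + 1 - i = (j - i) + 1 := by omega
  have h2 : i + (j - i) = j := by omega
  rw [h1, List.range'_1_concat, h2, List.filter_append]
  have h3 : List.filter (fun d => domb A le d (j + 1 - 1)) [j] = [j] := by
    have hd : domb A le j j = true := by
      rw [domb_iff]; intro k h1 h2; omega
    simp [hd]
  rw [h3, List.filter_filter]
  congr 1
  rw [List.filter_congr]
  intro d hd
  rw [List.mem_range'_1] at hd
  have hdj : d < j := by omega
  have : j + 1 - 1 = j := by omega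
  rw [this, domb_succ A le d j hdj]
  rw [Bool.and_comm]

lemma wcands_split (A : List Int) (le : Int → Int → Bool) (i j : Nat) (hij : i < j) :
    wcands A le i j =
      (if domb A le i (j - 1) then [i] else []) ++ wcands A le (i + 1) j := by
  unfold wcands
  have h1 : j - i = (j - (i + 1)) + 1 := by omega
  rw [h1, List.range'_succ]
  by_cases h : domb A le i (j - 1) = true <;> simp [h]

lemma wcands_ne_nil (A : List Int) (le : Int → Int → Bool) (i j : Nat) (hij : i < j) :
    wcands A le i j ≠ [] := by
  have : j - 1 ∈ wcands A le i j := by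
    rw [mem_wcands]
    refine ⟨by omega, by omega, ?_⟩
    rw [domb_iff]; intro k h1 h2; omega
  exact List.ne_nil_of_mem this

lemma push_wcands (A : List Int) (le : Int → Int → Bool) (i j : Nat)
    (htot : ∀ x y, le x y = false → le y x = true)
    (htr : ∀ x y z, le x y = true → le y z = true → le x z = true) (hij : i ≤ j) :
    pushDq A le (wcands A le i j) j = wcands A le i (j + 1) := by
  rw [pushDq_eq_filter A le _ j (wcands_pairwise_push A le i j htot htr _),
    wcands_last A le i j hij]

lemma push_idem (A : List Int) (le : Int → Int → Bool) (i j : Nat)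
    (href : ∀ x, le x x = true)
    (htot : ∀ x y, le x y = false → le y x = true)
    (htr : ∀ x y z, le x y = true → le y z = true → le x z = true) (hij : i ≤ j) :
    pushDq A le (wcands A le i (j + 1)) j = wcands A le i (j + 1) := by
  rw [pushDq_eq_filter A le _ j (wcands_pairwise_push A le i (j + 1) htot htr _),
    wcands_last A le i j hij, List.filter_append, List.filter_filter]
  have h1 : List.filter (fun d => !le (aGet A d) (aGet A j)) [j] = [] := by
    simp [href (aGet A j)]
  rw [h1, List.append_nil]
  congr 1
  apply List.filter_congr
  intro d _
  cases le (aGet A d) (aGet A j) <;> simp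

lemma shrink_wcands (A : List Int) (le : Int → Int → Bool) (i j : Nat) (hij : i < j) :
    shrinkDq (wcands A le i j) i = wcands A le (i + 1) j := by
  rw [wcands_split A le i j hij]
  by_cases h : domb A le i (j - 1) = true
  · simp [h, shrinkDq]
  · simp only [Bool.not_eq_true] at h
    simp only [h, Bool.false_eq_true, if_false, List.nil_append]
    rcases hw : wcands A le (i + 1) j with _ | ⟨d, ds⟩
    · rfl
    · have hd : d ∈ wcands A le (i + 1) j := by rw [hw]; exact List.mem_cons_self
      rw [mem_wcands] at hd
      have : d ≠ i := by omega
      simp [shrinkDq, this]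

lemma head_best (A : List Int) (le : Int → Int → Bool) (i j : Nat)
    (href : ∀ x, le x x = true)
    (htot : ∀ x y, le x y = false → le y x = true)
    (htr : ∀ x y z, le x y = true → le y z = true → le x z = true) (hij : i < j) :
    ∀ k, i ≤ k → k < j → le (aGet A k) (aGet A ((wcands A le i j).headD 0)) = true := by
  have hne := wcands_ne_nil A le i j hij
  set h0 := (wcands A le i j).headD 0 with hh0
  have hmem : h0 ∈ wcands A le i j := by
    rw [hh0]
    rcases hw : wcands A le i j with _ | ⟨d, ds⟩
    · exact absurd hw hne
    · exact List.mem_cons_self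
  have hmin : ∀ k ∈ wcands A le i j, h0 ≤ k := by
    intro k hk
    rcases hw : wcands A le i j with _ | ⟨d, ds⟩
    · exact absurd hw hne
    · have hpw := wcands_pairwise_lt A le i j
      rw [hw] at hpw hk
      have hd0 : h0 = d := by rw [hh0, hw]; rfl
      rcases List.mem_cons.mp hk with hk | hk
      · omega
      · have := (List.pairwise_cons.mp hpw).1 k hk
        omega
  rw [mem_wcands] at hmem
  obtain ⟨hm1, hm2, hm3⟩ := hmem
  suffices aux : ∀ t k, i ≤ k → k < j → j - 1 - k ≤ t → le (aGet A k) (aGet A h0) = true by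
    exact fun k hk hk' => aux (j - 1 - k) k hk hk' le_rfl
  intro t
  induction t with
  | zero =>
    intro k hk hk' ht
    rcases lt_trichotomy k h0 with h | h | h
    · omega
    · rw [h]; exact href _
    · have := (domb_iff A le h0 (j - 1)).mp hm3 k h (by omega)
      exact htot _ _ this
  | succ t ih =>
    intro k hk hk' ht
    rcases lt_trichotomy k h0 with h | h | h
    · have hnotmem : k ∉ wcands A le i j := fun hm => by have := hmin k hm; omega
      have hdomb : domb A le k (j - 1) = false := by
        cases hd : domb A le k (j - 1)
        · rfl
        · exact absurd ((mem_wcands A le i j k).mpr ⟨hk, hk', hd⟩) hnotmem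
      have hex : ∃ m, k < m ∧ m ≤ j - 1 ∧ le (aGet A k) (aGet A m) = true := by
        by_contra hcon
        simp only [not_exists, not_and] at hcon
        have : domb A le k (j - 1) = true := by
          rw [domb_iff]
          intro m h1 h2
          cases hc : le (aGet A k) (aGet A m)
          · rfl
          · exact absurd hc (by simpa using hcon m h1 h2)
        rw [this] at hdomb; exact Bool.true_eq_false.mp hdomb
      obtain ⟨m, hm1, hm2, hm3⟩ := hex
      have := ih m (by omega) (by omega) (by omega)
      exact htr _ _ _ hm3 this
    · rw [h]; exact href _
    · have := (domb_iff A le h0 (j - 1)).mp hm3 k h (by omega)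
      exact htot _ _ this

lemma validb_iff (K : Int) (A : List Int) (i r : Nat) :
    validb K A i r = true ↔
      ∀ p q, i ≤ p → p ≤ r → i ≤ q → q ≤ r → aGet A p - aGet A q ≤ K := by
  simp only [validb, List.all_eq_true, List.mem_range'_1, decide_eq_true_eq]
  constructor
  · intro h p q hp hp' hq hq'
    exact h p ⟨hp, by omega⟩ q ⟨hq, by omega⟩
  · intro h p hp q hq
    exact h p q hp.1 (by omega) hq.1 (by omega)

lemma validb_mono (K : Int) (A : List Int) {i r i' r' : Nat} (h : validb K A i r = true)
    (hi : i ≤ i') (hr : r' ≤ r) : validb K A i' r' = true := by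
  rw [validb_iff] at h ⊢
  intro p q hp hp' hq hq'
  exact h p q (by omega) (by omega) (by omega) (by omega)

lemma validb_of_gt (K : Int) (A : List Int) {i r : Nat} (h : r < i) : validb K A i r = true := by
  rw [validb_iff]; intro p q hp hp' hq hq'; omega

lemma validb_self (K : Int) (A : List Int) (hK : 0 ≤ K) (i : Nat) : validb K A i i = true := by
  rw [validb_iff]
  intro p q hp hp' hq hq'
  have h1 : p = i := by omega
  have h2 : q = i := by omega
  rw [h1, h2]
  omega

lemma firstBad_le (K : Int) (A : List Int) (i : Nat) : firstBad K A i ≤ A.length :=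
  Nat.find_le (Or.inl le_rfl)

lemma firstBad_valid (K : Int) (A : List Int) (i : Nat) :
    ∀ r, r < firstBad K A i → validb K A i r = true ∧ r < A.length := by
  intro r hr
  have := Nat.find_min (p := fun r => A.length ≤ r ∨ validb K A i r = false)
    ⟨A.length, Or.inl le_rfl⟩ hr
  simp only [not_or] at this
  exact ⟨by simpa using this.2, by omega⟩

lemma firstBad_eq (K : Int) (A : List Int) (i m : Nat)
    (h1 : A.length ≤ m ∨ validb K A i m = false)
    (h2 : ∀ r, r < m → validb K A i r = true ∧ r < A.length) : firstBad K A i = m := by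
  rw [firstBad, Nat.find_eq_iff]
  refine ⟨h1, fun r hr hc => ?_⟩
  have := h2 r hr
  rcases hc with hc | hc
  · omega
  · rw [this.1] at hc; exact Bool.true_eq_false.mp hc

lemma firstBad_ge_succ (K : Int) (A : List Int) (i : Nat) (hK : 0 ≤ K) (hi : i < A.length) :
    i + 1 ≤ firstBad K A i := by
  by_contra hcon
  have hspec := Nat.find_spec (p := fun r => A.length ≤ r ∨ validb K A i r = false)
    ⟨A.length, Or.inl le_rfl⟩
  rw [show Nat.find _ = firstBad K A i from rfl] at hspec
  rcases hspec with h | h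
  · omega
  · rcases Nat.lt_or_ge (firstBad K A i) i with h2 | h2
    · rw [validb_of_gt K A h2] at h; exact Bool.true_eq_false.mp h
    · have : firstBad K A i = i := by omega
      rw [this, validb_self K A hK i] at h; exact Bool.true_eq_false.mp h

lemma headD_mem {l : List Nat} (h : l ≠ []) : l.headD 0 ∈ l := by
  rcases l with _ | ⟨a, t⟩
  · exact absurd rfl h
  · exact List.mem_cons_self

lemma check_iff (K : Int) (A : List Int) (i j : Nat) (hij : i ≤ j) :
    (aGet A ((wcands A (fun x y => decide (x ≤ y)) i (j + 1)).headD 0)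
      - aGet A ((wcands A (fun x y => decide (y ≤ x)) i (j + 1)).headD 0) ≤ K)
    ↔ validb K A i j = true := by
  have hrefL : ∀ x : Int, decide (x ≤ x) = true := by simp
  have htotL : ∀ x y : Int, decide (x ≤ y) = false → decide (y ≤ x) = true := by
    intro x y h; simp at h ⊢; omega
  have htrL : ∀ x y z : Int, decide (x ≤ y) = true → decide (y ≤ z) = true →
      decide (x ≤ z) = true := by intro x y z h1 h2; simp at h1 h2 ⊢; omega
  have htotG : ∀ x y : Int, decide (y ≤ x) = false → decide (x ≤ y) = true := by
    intro x y h; simp at h ⊢; omega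
  have htrG : ∀ x y z : Int, decide (y ≤ x) = true → decide (z ≤ y) = true →
      decide (z ≤ x) = true := by intro x y z h1 h2; simp at h1 h2 ⊢; omega
  have hij1 : i < j + 1 := by omega
  have hMmem := headD_mem (wcands_ne_nil A (fun x y => decide (x ≤ y)) i (j + 1) hij1)
  rw [mem_wcands] at hMmem
  have hmmem := headD_mem (wcands_ne_nil A (fun x y => decide (y ≤ x)) i (j + 1) hij1)
  rw [mem_wcands] at hmmem
  constructor
  · intro hc
    rw [validb_iff]
    intro p q hp hp' hq hq'
    have h1 := head_best A (fun x y => decide (x ≤ y)) i (j + 1) hrefL htotL htrL hij1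
      p hp (by omega)
    have h2 := head_best A (fun x y => decide (y ≤ x)) i (j + 1) hrefL htotG htrG hij1
      q hq (by omega)
    simp only [decide_eq_true_eq] at h1 h2
    omega
  · intro hv
    rw [validb_iff] at hv
    exact hv _ _ hMmem.1 (by omega) hmmem.1 (by omega)

lemma expand_spec (K : Int) (A : List Int) (i : Nat) :
    ∀ t j maxdq mindq, A.length - j ≤ t → i ≤ j → j ≤ A.length →
    (maxdq = wcands A (fun x y => decide (x ≤ y)) i j ∨
      (j < A.length ∧ maxdq = wcands A (fun x y => decide (x ≤ y)) i (j + 1))) →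
    (mindq = wcands A (fun x y => decide (y ≤ x)) i j ∨
      (j < A.length ∧ mindq = wcands A (fun x y => decide (y ≤ x)) i (j + 1))) →
    (∀ r, i ≤ r → r < j → validb K A i r = true) →
    expandA K A maxdq mindq j =
      (wcands A (fun x y => decide (x ≤ y)) i (min (firstBad K A i + 1) A.length),
       wcands A (fun x y => decide (y ≤ x)) i (min (firstBad K A i + 1) A.length),
       firstBad K A i) := by
  have hrefL : ∀ x : Int, decide (x ≤ x) = true := by simp
  have htotL : ∀ x y : Int, decide (x ≤ y) = false → decide (y ≤ x) = true := by
    intro x y h; simp at h ⊢; omega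
  have htrL : ∀ x y z : Int, decide (x ≤ y) = true → decide (y ≤ z) = true →
      decide (x ≤ z) = true := by intro x y z h1 h2; simp at h1 h2 ⊢; omega
  have hrefG : ∀ x : Int, decide (x ≤ x) = true := by simp
  have htotG : ∀ x y : Int, decide (y ≤ x) = false → decide (x ≤ y) = true := by
    intro x y h; simp at h ⊢; omega
  have htrG : ∀ x y z : Int, decide (y ≤ x) = true → decide (z ≤ y) = true →
      decide (z ≤ x) = true := by intro x y z h1 h2; simp at h1 h2 ⊢; omega
  intro t
  induction t with
  | zero =>
    intro j maxdq mindq ht hij hjn hmax hmin hval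
    have hjn' : j = A.length := by omega
    rw [expandA]
    rw [dif_neg (by omega)]
    have hfb : firstBad K A i = A.length := by
      apply firstBad_eq
      · exact Or.inl le_rfl
      · intro r hr
        rcases Nat.lt_or_ge r i with h | h
        · exact ⟨validb_of_gt K A h, by omega⟩
        · exact ⟨hval r h (by omega), by omega⟩
    rcases hmax with hmax | hmax
    · rcases hmin with hmin | hmin
      · rw [hmax, hmin, hfb, hjn']
        have hmm : min (A.length + 1) A.length = A.length := by omega
        rw [hmm]
      · omega
    · omega
  | succ t ih =>
    intro j maxdq mindq ht hij hjn hmax hmin hval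
    rcases Nat.lt_or_ge j A.length with hjlt | hjge
    · rw [expandA, dif_pos hjlt]
      have hpmax : pushDq A (fun x y => decide (x ≤ y)) maxdq j =
          wcands A (fun x y => decide (x ≤ y)) i (j + 1) := by
        rcases hmax with hmax | hmax
        · rw [hmax]; exact push_wcands A _ i j htotL htrL hij
        · rw [hmax.2]; exact push_idem A _ i j hrefL htotL htrL hij
      have hpmin : pushDq A (fun x y => decide (y ≤ x)) mindq j =
          wcands A (fun x y => decide (y ≤ x)) i (j + 1) := by
        rcases hmin with hmin | hmin
        · rw [hmin]; exact push_wcands A _ i j htotG htrG hij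
        · rw [hmin.2]; exact push_idem A _ i j hrefG htotG htrG hij
      rw [hpmax, hpmin]
      by_cases hc : aGet A ((wcands A (fun x y => decide (x ≤ y)) i (j + 1)).headD 0)
          - aGet A ((wcands A (fun x y => decide (y ≤ x)) i (j + 1)).headD 0) ≤ K
      · rw [if_pos hc]
        apply ih (j + 1) _ _ (by omega) (by omega) (by omega) (Or.inl rfl) (Or.inl rfl)
        intro r hr hr'
        rcases Nat.lt_or_ge r j with h | h
        · exact hval r hr h
        · have : r = j := by omega
          rw [this]
          exact ((check_iff K A i j hij).mp hc)
      · rw [if_neg hc]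
        have hvj : validb K A i j = false := by
          cases hv : validb K A i j
          · rfl
          · exact absurd ((check_iff K A i j hij).mpr hv) hc
        have hfb : firstBad K A i = j := by
          apply firstBad_eq
          · exact Or.inr hvj
          · intro r hr
            rcases Nat.lt_or_ge r i with h | h
            · exact ⟨validb_of_gt K A h, by omega⟩
            · exact ⟨hval r h hr, by omega⟩
        rw [hfb]
        have : min (j + 1) A.length = j + 1 := by omega
        rw [this]
    · rw [expandA, dif_neg (by omega)]
      have hjn' : j = A.length := by omega
      have hfb : firstBad K A i = A.length := by
        apply firstBad_eq
        · exact Or.inl le_rfl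
        · intro r hr
          rcases Nat.lt_or_ge r i with h | h
          · exact ⟨validb_of_gt K A h, by omega⟩
          · exact ⟨hval r h (by omega), by omega⟩
      rcases hmax with hmax | hmax
      · rcases hmin with hmin | hmin
        · rw [hmax, hmin, hfb, hjn']
          have hmm : min (A.length + 1) A.length = A.length := by omega
          rw [hmm]
        · omega
      · omega

lemma wcands_self (A : List Int) (le : Int → Int → Bool) (i : Nat) :
    wcands A le i i = [] := by simp [wcands]

lemma loopA (K : Int) (A : List Int) (hK : 0 ≤ K) :
    ∀ m i (count : Int) maxdq mindq j, i + m = A.length →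
    i ≤ j → j ≤ A.length →
    (maxdq = wcands A (fun x y => decide (x ≤ y)) i j ∨
      (j < A.length ∧ maxdq = wcands A (fun x y => decide (x ≤ y)) i (j + 1))) →
    (mindq = wcands A (fun x y => decide (y ≤ x)) i j ∨
      (j < A.length ∧ mindq = wcands A (fun x y => decide (y ≤ x)) i (j + 1))) →
    (∀ r, i ≤ r → r < j → validb K A i r = true) →
    ((List.range' i m).foldl (stepA K A) (count, maxdq, mindq, j)).1 =
      count + ((List.range' i m).map (fun t => (firstBad K A t : Int) - (t : Int))).sum := by
  intro m
  induction m with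
  | zero =>
    intro i count maxdq mindq j _ _ _ _ _ _
    simp
  | succ m ih =>
    intro i count maxdq mindq j hlen hij hjn hmax hmin hval
    have hi_lt : i < A.length := by omega
    have hexp := expand_spec K A i (A.length - j) j maxdq mindq le_rfl hij hjn hmax hmin hval
    have hfb1 := firstBad_ge_succ K A i hK hi_lt
    have hfb2 := firstBad_le K A i
    have hstep : stepA K A (count, maxdq, mindq, j) i =
        (count + ((firstBad K A i : Int) - (i : Int)),
         wcands A (fun x y => decide (x ≤ y)) (i + 1) (min (firstBad K A i + 1) A.length),
         wcands A (fun x y => decide (y ≤ x)) (i + 1) (min (firstBad K A i + 1) A.length),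
         firstBad K A i) := by
      have hiM : i < min (firstBad K A i + 1) A.length := by omega
      simp only [stepA, hexp]
      rw [shrink_wcands A _ i _ hiM, shrink_wcands A _ i _ hiM]
    rw [List.range'_succ, List.foldl_cons, hstep, List.map_cons, List.sum_cons]
    rw [ih (i + 1) _ _ _ (firstBad K A i) (by omega) (by omega) (by omega) ?hmax ?hmin ?hval]
    · rw [add_assoc]
    case hmax =>
      rcases Nat.lt_or_ge (firstBad K A i) A.length with h | h
      · exact Or.inr ⟨h, by rw [min_eq_left (by omega)]⟩
      · have hfb : firstBad K A i = A.length := by omega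
        exact Or.inl (by rw [hfb, min_eq_right (by omega)])
    case hmin =>
      rcases Nat.lt_or_ge (firstBad K A i) A.length with h | h
      · exact Or.inr ⟨h, by rw [min_eq_left (by omega)]⟩
      · have hfb : firstBad K A i = A.length := by omega
        exact Or.inl (by rw [hfb, min_eq_right (by omega)])
    case hval =>
      intro r hr hr'
      exact validb_mono K A (firstBad_valid K A i r hr').1 (by omega) le_rfl

lemma solutionA_sum (K : Int) (A : List Int) (hK : 0 ≤ K) :
    solution K A =
      ((List.range' 0 A.length).map (fun t => (firstBad K A t : Int) - (t : Int))).sum := by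
  unfold solution
  rw [List.range_eq_range']
  rw [loopA K A hK A.length 0 0 [] [] 0 (by omega) le_rfl (by omega)
    (Or.inl (wcands_self A _ 0).symm) (Or.inl (wcands_self A _ 0).symm)
    (fun r hr hr' => by omega)]
  simp

lemma runMin_self (A : List Int) (i : Nat) : runMin A i i = aGet A i := by simp [runMin]

lemma runMax_self (A : List Int) (i : Nat) : runMax A i i = aGet A i := by simp [runMax]

lemma runMin_succ (A : List Int) (i p : Nat) (hip : i ≤ p) :
    runMin A i (p + 1) = min (runMin A i p) (aGet A p) := by
  unfold runMin
  rw [show p + 1 - i = (p - i) + 1 from by omega, List.range'_1_concat,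
    show i + (p - i) = p from by omega, List.foldl_append]
  rfl

lemma runMax_succ (A : List Int) (i p : Nat) (hip : i ≤ p) :
    runMax A i (p + 1) = max (runMax A i p) (aGet A p) := by
  unfold runMax
  rw [show p + 1 - i = (p - i) + 1 from by omega, List.range'_1_concat,
    show i + (p - i) = p from by omega, List.foldl_append]
  rfl

lemma runMin_le (A : List Int) (i : Nat) :
    ∀ p, i ≤ p → ∀ k, i ≤ k → (k = i ∨ k < p) → runMin A i p ≤ aGet A k := by
  intro p
  induction p with
  | zero =>
    intro hip k hk hk'
    have h1 : k = i := by omega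
    rw [h1, show i = 0 from by omega, runMin_self]
  | succ p ih =>
    intro hip k hk hk'
    rcases Nat.lt_or_ge i (p + 1) with hip' | hip'
    · have hip2 : i ≤ p := by omega
      rw [runMin_succ A i p hip2]
      rcases hk' with hk' | hk'
      · exact le_trans (min_le_left _ _) (ih hip2 k hk (Or.inl hk'))
      · rcases Nat.lt_or_ge k p with h | h
        · exact le_trans (min_le_left _ _) (ih hip2 k hk (Or.inr h))
        · have : k = p := by omega
          rw [this]; exact min_le_right _ _
    · have h1 : k = i := by omega
      have h2 : i = p + 1 := by omega
      rw [h1, h2, runMin_self]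

lemma runMax_ge (A : List Int) (i : Nat) :
    ∀ p, i ≤ p → ∀ k, i ≤ k → (k = i ∨ k < p) → aGet A k ≤ runMax A i p := by
  intro p
  induction p with
  | zero =>
    intro hip k hk hk'
    have h1 : k = i := by omega
    rw [h1, show i = 0 from by omega, runMax_self]
  | succ p ih =>
    intro hip k hk hk'
    rcases Nat.lt_or_ge i (p + 1) with hip' | hip'
    · have hip2 : i ≤ p := by omega
      rw [runMax_succ A i p hip2]
      rcases hk' with hk' | hk'
      · exact le_trans (ih hip2 k hk (Or.inl hk')) (le_max_left _ _)
      · rcases Nat.lt_or_ge k p with h | h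
        · exact le_trans (ih hip2 k hk (Or.inr h)) (le_max_left _ _)
        · have : k = p := by omega
          rw [this]; exact le_max_right _ _
    · have h1 : k = i := by omega
      have h2 : i = p + 1 := by omega
      rw [h1, h2, runMax_self]

lemma runMin_attain (A : List Int) (i : Nat) :
    ∀ p, i ≤ p → ∃ s, i ≤ s ∧ (s = i ∨ s < p) ∧ runMin A i p = aGet A s := by
  intro p
  induction p with
  | zero =>
    intro hip
    exact ⟨i, le_rfl, Or.inl rfl, by rw [show i = 0 from by omega, runMin_self]⟩
  | succ p ih =>
    intro hip
    rcases Nat.lt_or_ge i (p + 1) with hip' | hip'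
    · have hip2 : i ≤ p := by omega
      obtain ⟨s, hs1, hs2, hs3⟩ := ih hip2
      rw [runMin_succ A i p hip2]
      rcases le_total (runMin A i p) (aGet A p) with h | h
      · exact ⟨s, hs1, by omega, by rw [min_eq_left h, hs3]⟩
      · exact ⟨p, by omega, by omega, by rw [min_eq_right h]⟩
    · exact ⟨i, le_rfl, Or.inl rfl, by rw [show i = p + 1 from by omega, runMin_self]⟩

lemma runMax_attain (A : List Int) (i : Nat) :
    ∀ p, i ≤ p → ∃ s, i ≤ s ∧ (s = i ∨ s < p) ∧ runMax A i p = aGet A s := by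
  intro p
  induction p with
  | zero =>
    intro hip
    exact ⟨i, le_rfl, Or.inl rfl, by rw [show i = 0 from by omega, runMax_self]⟩
  | succ p ih =>
    intro hip
    rcases Nat.lt_or_ge i (p + 1) with hip' | hip'
    · have hip2 : i ≤ p := by omega
      obtain ⟨s, hs1, hs2, hs3⟩ := ih hip2
      rw [runMax_succ A i p hip2]
      rcases le_total (runMax A i p) (aGet A p) with h | h
      · exact ⟨p, by omega, by omega, by rw [max_eq_right h]⟩
      · exact ⟨s, hs1, by omega, by rw [max_eq_left h, hs3]⟩
    · exact ⟨i, le_rfl, Or.inl rfl, by rw [show i = p + 1 from by omega, runMax_self]⟩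

lemma run_check_iff (K : Int) (A : List Int) (i p : Nat) (hip : i ≤ p) :
    runMax A i (p + 1) - runMin A i (p + 1) ≤ K ↔ validb K A i p = true := by
  constructor
  · intro hc
    rw [validb_iff]
    intro p' q' hp hp' hq hq'
    have h1 := runMax_ge A i (p + 1) (by omega) p' hp (by omega)
    have h2 := runMin_le A i (p + 1) (by omega) q' hq (by omega)
    omega
  · intro hv
    rw [validb_iff] at hv
    obtain ⟨s, hs1, hs2, hs3⟩ := runMin_attain A i (p + 1) (by omega)
    obtain ⟨s', hs1', hs2', hs3'⟩ := runMax_attain A i (p + 1) (by omega)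
    have := hv s' s hs1' (by omega) hs1 (by omega)
    omega

lemma scan_spec (K : Int) (A : List Int) (i : Nat) :
    ∀ t p (cnt : Int), i ≤ p → p ≤ A.length → A.length - p ≤ t →
    (∀ r, i ≤ r → r < p → validb K A i r = true) →
    scanB K (runMin A i p) (runMax A i p) cnt (A.drop p) =
      cnt + ((firstBad K A i : Int) - (p : Int)) := by
  intro t
  induction t with
  | zero =>
    intro p cnt hip hpn ht hval
    have hp : p = A.length := by omega
    rw [hp, List.drop_length]
    have hfb : firstBad K A i = A.length := by
      apply firstBad_eq
      · exact Or.inl le_rfl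
      · intro r hr
        rcases Nat.lt_or_ge r i with h | h
        · exact ⟨validb_of_gt K A h, by omega⟩
        · exact ⟨hval r h (by omega), by omega⟩
    rw [hfb]
    simp [scanB]
  | succ t ih =>
    intro p cnt hip hpn ht hval
    rcases Nat.lt_or_ge p A.length with hp | hp
    · rw [List.drop_eq_getElem_cons hp]
      show scanB K (runMin A i p) (runMax A i p) cnt (A[p] :: A.drop (p + 1)) = _
      rw [scanB]
      have hgp : A[p] = aGet A p := (List.getD_eq_getElem A 0 hp).symm
      simp only [hgp, ← runMin_succ A i p hip, ← runMax_succ A i p hip]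
      by_cases hc : K < runMax A i (p + 1) - runMin A i (p + 1)
      · rw [if_pos hc]
        have hvp : validb K A i p = false := by
          cases hv : validb K A i p
          · rfl
          · have := (run_check_iff K A i p hip).mpr hv; omega
        have hfb : firstBad K A i = p := by
          apply firstBad_eq
          · exact Or.inr hvp
          · intro r hr
            rcases Nat.lt_or_ge r i with h | h
            · exact ⟨validb_of_gt K A h, by omega⟩
            · exact ⟨hval r h hr, by omega⟩
        rw [hfb]
        simp
      · rw [if_neg hc]
        have hvp : validb K A i p = true := (run_check_iff K A i p hip).mp (by omega)
        rw [ih (p + 1) (cnt + 1) (by omega) (by omega) (by omega) ?hv]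
        · push_cast; ring
        case hv =>
          intro r hr hr'
          rcases Nat.lt_or_ge r p with h | h
          · exact hval r hr h
          · rw [show r = p from by omega]; exact hvp
    · have hp' : p = A.length := by omega
      rw [hp', List.drop_length]
      have hfb : firstBad K A i = A.length := by
        apply firstBad_eq
        · exact Or.inl le_rfl
        · intro r hr
          rcases Nat.lt_or_ge r i with h | h
          · exact ⟨validb_of_gt K A h, by omega⟩
          · exact ⟨hval r h (by omega), by omega⟩
      rw [hfb]
      simp [scanB]

lemma alt_sum (K : Int) (A : List Int) :
    solution_alt K A =
      ((List.range' 0 A.length).map (fun t => (firstBad K A t : Int) - (t : Int))).sum := by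
  unfold solution_alt
  rw [List.range_eq_range']
  have hc : ∀ i ∈ List.range' 0 A.length, ∀ acc : Int,
      scanB K (A.getD i 0) (A.getD i 0) acc (A.drop i) =
        acc + ((firstBad K A i : Int) - (i : Int)) := by
    intro i hi acc
    rw [List.mem_range'_1] at hi
    have h1 : scanB K (runMin A i i) (runMax A i i) acc (A.drop i) =
        acc + ((firstBad K A i : Int) - (i : Int)) :=
      scan_spec K A i (A.length - i) i acc le_rfl (by omega) le_rfl
        (fun r hr hr' => by omega)
    rw [runMin_self, runMax_self] at h1
    exact h1
  rw [PySem.List.foldl_congr_mem' _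
    (fun total i => scanB K (A.getD i 0) (A.getD i 0) total (A.drop i))
    (fun (total : Int) (i : Nat) => total + ((firstBad K A i : Int) - (i : Int))) _ hc]
  rw [PySem.List.foldl_add]
  simp

lemma main_eq (K : Int) (A : List Int) (hK : 0 ≤ K) : solution K A = solution_alt K A := by
  rw [solutionA_sum K A hK, alt_sum]

lemma expand_neg0 (K : Int) (A : List Int) (hK : K < 0) (hn : 0 < A.length) :
    expandA K A [] [] 0 = ([0], [0], 0) := by
  rw [expandA, dif_pos hn]
  simp only [pushDq, List.reverse_nil, List.dropWhile_nil, List.nil_append, List.headD_cons]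
  rw [if_neg (by omega)]

lemma expand_neg1 (K : Int) (A : List Int) (hK : K < 0) (hn : 0 < A.length) :
    expandA K A [0] [0] 0 = ([0], [0], 0) := by
  rw [expandA, dif_pos hn]
  simp only [pushDq, List.reverse_cons, List.reverse_nil, List.nil_append,
    List.dropWhile_cons, List.dropWhile_nil, decide_eq_true_eq, le_refl, if_true,
    List.headD_cons]
  rw [if_neg (by omega)]

lemma step_neg0 (K : Int) (A : List Int) (hK : K < 0) (hn : 0 < A.length) :
    stepA K A (0, [], [], 0) 0 = (0, [], [], 0) := by
  simp only [stepA, expand_neg0 K A hK hn]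
  simp [shrinkDq]

lemma step_neg1 (K : Int) (A : List Int) (hK : K < 0) (hn : 0 < A.length) :
    stepA K A (0, [], [], 0) 1 = (-1, [0], [0], 0) := by
  simp only [stepA, expand_neg0 K A hK hn]
  simp [shrinkDq]

lemma step_neg (K : Int) (A : List Int) (hK : K < 0) (hn : 0 < A.length)
    (c : Int) (i : Nat) (hi : 1 ≤ i) :
    stepA K A (c, [0], [0], 0) i = (c - (i : Int), [0], [0], 0) := by
  simp only [stepA, expand_neg1 K A hK hn]
  have h0i : ¬ ((0 : Nat) = i) := by omega
  simp [shrinkDq, h0i]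
  ring

lemma loop_neg (K : Int) (A : List Int) (hK : K < 0) (hn : 0 < A.length) :
    ∀ m i (c : Int), 1 ≤ i →
    ((List.range' i m).foldl (stepA K A) (c, [0], [0], 0)).1 =
      c - ((List.range' i m).map (fun t : Nat => (t : Int))).sum := by
  intro m
  induction m with
  | zero => intro i c hi; simp
  | succ m ih =>
    intro i c hi
    rw [List.range'_succ, List.foldl_cons, step_neg K A hK hn c i hi,
      ih (i + 1) _ (by omega), List.map_cons, List.sum_cons]
    ring

lemma solution_neg (K : Int) (A : List Int) (hK : K < 0) (hn : 2 ≤ A.length) :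
    solution K A = -1 - ((List.range' 2 (A.length - 2)).map (fun t : Nat => (t : Int))).sum := by
  unfold solution
  rw [List.range_eq_range']
  have hsplit : List.range' 0 A.length = 0 :: 1 :: List.range' 2 (A.length - 2) := by
    have h2 : A.length = 2 + (A.length - 2) := by omega
    conv_lhs => rw [h2]
    rw [show 2 + (A.length - 2) = ((A.length - 2) + 1) + 1 from by omega,
      List.range'_succ, List.range'_succ]
  rw [hsplit, List.foldl_cons, List.foldl_cons]
  rw [step_neg0 K A hK (by omega), step_neg1 K A hK (by omega)]
  exact loop_neg K A hK (by omega) (A.length - 2) 2 (-1) (by omega)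

lemma alt_neg (K : Int) (A : List Int) (hK : K < 0) : solution_alt K A = 0 := by
  rw [alt_sum]
  have h : ∀ t ∈ List.range' 0 A.length,
      (fun t => ((firstBad K A t : Int) - (t : Int))) t = (fun _ => (0 : Int)) t := by
    intro t ht
    rw [List.mem_range'_1] at ht
    have hfb : firstBad K A t = t := by
      apply firstBad_eq
      · right
        cases hv : validb K A t t
        · rfl
        · have := (validb_iff K A t t).mp hv t t le_rfl le_rfl le_rfl le_rfl
          omega
      · intro r hr
        exact ⟨validb_of_gt K A hr, by omega⟩
    simp [hfb]
  rw [List.map_congr_left h]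
  simp

lemma single_neg_sol (K x : Int) (hK : K < 0) : solution K [x] = 0 := by
  unfold solution
  rw [show List.range ([x] : List Int).length = [0] from rfl,
    List.foldl_cons, step_neg0 K [x] hK (by simp), List.foldl_nil]

lemma single_neg_alt (K x : Int) (hK : K < 0) : solution_alt K [x] = 0 := by
  unfold solution_alt
  rw [show List.range ([x] : List Int).length = [0] from rfl, List.foldl_cons, List.foldl_nil]
  show scanB K x x 0 [x] = 0
  simp [scanB, hK]

-- ===== VERDICT (by name: the statement is the Claim_ definition above) =====
theorem solution_spec : Claim_unchanged_solution := by
  intro K A _ hnd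
  by_cases hK : 0 ≤ K
  · exact main_eq K A hK
  · have hK' : K < 0 := by omega
    have hn : A.length ≤ 1 := by
      by_contra h
      exact hnd (show K < 0 ∧ 2 ≤ A.length from ⟨hK', by omega⟩)
    rcases A with _ | ⟨x, _ | ⟨y, t⟩⟩
    · rfl
    · rw [single_neg_sol K x hK', single_neg_alt K x hK']
    · simp at hn

theorem solution_changed : Claim_changed_solution := by
  unfold Claim_changed_solution
  refine ⟨by decide, by decide, ?_, ?_, by decide⟩
  · show solution (-1) [0, 0] = -1
    rw [solution_neg (-1) [0, 0] (by norm_num) (by norm_num)]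
    simp
  · show solution_alt (-1) [0, 0] = 0
    exact alt_neg (-1) [0, 0] (by norm_num)

theorem solution_tight : Claim_exact_solution := by
  intro K A _ hD
  obtain ⟨hK, hn⟩ := hD
  rw [alt_neg K A hK, solution_neg K A hK hn]
  have hs : 0 ≤ ((List.range' 2 (A.length - 2)).map (fun t : Nat => (t : Int))).sum := by
    apply List.sum_nonneg
    intro y hy
    obtain ⟨t, _, rfl⟩ := List.mem_map.mp hy
    exact Int.natCast_nonneg t
  omega
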